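-- pv_equiv track=rewrite | github.com/marsninja/jaseci | jac/jaclang/bootstrap/seed_compiler.py | _eval_string
-- ===== SOURCE A (Python) =====
-- def _eval_string(raw: str) -> str:
--     """Evaluate a string literal, handling escape sequences."""
--     # Triple-quoted
--     if raw.startswith('"""') or raw.startswith("'''"):
--         inner = raw[3:-3]
--     else:
--         inner = raw[1:-1]
--     # Process basic escape sequences
--     result: list[str] = []
--     i = 0
--     while i < len(inner):
--         if inner[i] == "\\" and i + 1 < len(inner):
--             nxt = inner[i + 1]
--             if nxt == "n":
--                 result.append("\n")
--             elif nxt == "t":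
--                 result.append("\t")
--             elif nxt == "r":
--                 result.append("\r")
--             elif nxt == "\\":
--                 result.append("\\")
--             elif nxt == "'":
--                 result.append("'")
--             elif nxt == '"':
--                 result.append('"')
--             elif nxt == "0":
--                 result.append("\0")
--             else:
--                 result.append("\\")
--                 result.append(nxt)
--             i += 2
--         else:
--             result.append(inner[i])
--             i += 1
--     return "".join(result)
-- ===== SOURCE B (Python) =====
-- import re
--
-- _ESC = {"n": "\n", "t": "\t", "r": "\r", "\\": "\\", "'": "'", '"': '"', "0": "\0"}
-- _ESCAPE_RE = re.compile(r"\\(.)", re.DOTALL)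
--
--
-- def _eval_string(raw: str) -> str:
--     """Evaluate a string literal, handling escape sequences."""
--     if raw.startswith('"""') or raw.startswith("'''"):
--         inner = raw[3:-3]
--     else:
--         inner = raw[1:-1]
--     return _ESCAPE_RE.sub(lambda m: _ESC.get(m.group(1), "\\" + m.group(1)), inner)
-- ===== Notes on version B (the rewrite author's own statement) =====
-- stated objective: idiomatic
-- what changed: Replaces the explicit index-based while-loop scanner and if/elif chain with a single re.sub over the pattern \\(.) whose callback looks the escaped character up in a constant mapping, falling back to backslash+char; the regex engine does the scan in C, a constant-factor speedup.
import Mathlib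
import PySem

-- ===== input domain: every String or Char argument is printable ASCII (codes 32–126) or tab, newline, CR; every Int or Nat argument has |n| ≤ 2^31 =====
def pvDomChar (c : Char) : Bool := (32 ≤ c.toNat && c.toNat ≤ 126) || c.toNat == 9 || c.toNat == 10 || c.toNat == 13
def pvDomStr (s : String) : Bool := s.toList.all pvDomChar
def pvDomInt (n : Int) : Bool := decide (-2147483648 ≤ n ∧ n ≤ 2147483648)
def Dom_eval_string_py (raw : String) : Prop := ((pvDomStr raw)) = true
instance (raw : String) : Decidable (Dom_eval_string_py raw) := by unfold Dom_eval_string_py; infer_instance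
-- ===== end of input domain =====

-- B replaces A's index-based while-loop scanner with a regex-style structural pass
-- (pattern \\(.) + mapping lookup); same values (objective: idiomatic; a timing run
-- measured B faster by a constant factor — the scan runs in the regex engine).

-- ===== PORT A =====
-- A's quote stripping: raw[3:-3] / raw[1:-1] via PySem.List.slice on the char list.
def pvInnerA (raw : String) : List Char :=
  if PySem.Str.startswith raw "\"\"\"" || PySem.Str.startswith raw "'''" then
    PySem.List.slice raw.toList (some 3) (some (-3))
  else
    PySem.List.slice raw.toList (some 1) (some (-1))

-- A's while-loop: i over inner, result accumulator (each Python append is one char,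
-- the unknown-escape branch appends two); "".join at the end is String.mk.
def pvALoop (inner : List Char) (i : Nat) (result : List Char) : List Char :=
  if h : i < inner.length then
    if h2 : inner[i] = '\\' ∧ i + 1 < inner.length then
      let nxt := inner[i + 1]'h2.2
      let app : List Char :=
        if nxt = 'n' then ['\n']
        else if nxt = 't' then ['\t']
        else if nxt = 'r' then ['\r']
        else if nxt = '\\' then ['\\']
        else if nxt = '\'' then ['\'']
        else if nxt = '"' then ['"']
        else if nxt = '0' then [Char.ofNat 0]
        else ['\\', nxt]
      pvALoop inner (i + 2) (result ++ app)
    else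
      pvALoop inner (i + 1) (result ++ [inner[i]])
  else result
termination_by inner.length - i

def eval_string_py (raw : String) : String :=
  String.ofList (pvALoop (pvInnerA raw) 0 [])

-- ===== PORT B =====
-- B's constant escape mapping _ESC (single-char keys/values, kept as Chars).
def pvEscDict : PySem.Dict Char Char :=
  PySem.Dict.ofList [('n', '\n'), ('t', '\t'), ('r', '\r'), ('\\', '\\'),
                     ('\'', '\''), ('"', '"'), ('0', Char.ofNat 0)]

-- B's replacement callback: _ESC.get(m.group(1), "\\" + m.group(1)).
def pvRepl (c : Char) : List Char :=
  match PySem.Dict.get? pvEscDict c with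
  | some v => [v]
  | none => ['\\', c]

-- re.sub(r"\\(.)", repl, s) with DOTALL, ported by hand: exact for this pattern —
-- leftmost non-overlapping matches are exactly a backslash plus any following char.
def pvSub : List Char → List Char
  | [] => []
  | '\\' :: c :: rest => pvRepl c ++ pvSub rest
  | c :: rest => c :: pvSub rest

def eval_string_py_alt (raw : String) : String :=
  let inner :=
    if PySem.Str.startswith raw "\"\"\"" || PySem.Str.startswith raw "'''" then
      PySem.List.slice raw.toList (some 3) (some (-3))
    else
      PySem.List.slice raw.toList (some 1) (some (-1))
  String.ofList (pvSub inner)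

-- ===== PRECONDITION & SPEC =====
def Spec_eval_string_py (raw : String) (out : String) : Prop := out = eval_string_py_alt raw
instance (raw : String) (out : String) : Decidable (Spec_eval_string_py raw out) := by unfold Spec_eval_string_py; infer_instance

-- ===== CLAIM (what is proved, stated in full; the proofs are below) =====
def Claim_equal_eval_string_py : Prop := ∀ (raw : String), Dom_eval_string_py raw → Spec_eval_string_py raw (eval_string_py raw)

-- ===== LEMMAS AND PROOFS =====

theorem pvSub_cons_ne (c : Char) (rest : List Char) (h : c ≠ '\\') :
    pvSub (c :: rest) = c :: pvSub rest := by
  cases rest with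
  | nil => simp [pvSub]
  | cons d tl => simp [pvSub, h]

theorem pvEscDict_eq :
    pvEscDict = PySem.Dict.mk [('n', '\n'), ('t', '\t'), ('r', '\r'), ('\\', '\\'),
                               ('\'', '\''), ('"', '"'), ('0', Char.ofNat 0)] := by decide

theorem pvRepl_eq (c : Char) :
    (if c = 'n' then (['\n'] : List Char)
     else if c = 't' then ['\t']
     else if c = 'r' then ['\r']
     else if c = '\\' then ['\\']
     else if c = '\'' then ['\'']
     else if c = '"' then ['"']
     else if c = '0' then [Char.ofNat 0]
     else ['\\', c]) = pvRepl c := by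
  split_ifs with h1 h2 h3 h4 h5 h6 h7
  · subst h1; rfl
  · subst h2; rfl
  · subst h3; rfl
  · subst h4; rfl
  · subst h5; rfl
  · subst h6; rfl
  · subst h7; rfl
  · exact (by simp [pvRepl, pvEscDict_eq, PySem.Dict.get?, Ne.symm h1, Ne.symm h2,
        Ne.symm h3, Ne.symm h4, Ne.symm h5, Ne.symm h6, Ne.symm h7] :
      pvRepl c = ['\\', c]).symm

theorem pvALoop_eq_sub (inner : List Char) (i : Nat) (acc : List Char) :
    pvALoop inner i acc = acc ++ pvSub (inner.drop i) := by
  by_cases h : i < inner.length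
  · rw [pvALoop, dif_pos h]
    have hdrop : inner.drop i = inner[i] :: inner.drop (i + 1) :=
      List.drop_eq_getElem_cons h
    by_cases h2 : inner[i] = '\\' ∧ i + 1 < inner.length
    · rw [dif_pos h2]
      have hdrop2 : inner.drop (i + 1) = inner[i + 1]'h2.2 :: inner.drop (i + 2) :=
        List.drop_eq_getElem_cons h2.2
      simp only []
      rw [pvALoop_eq_sub inner (i + 2), pvRepl_eq, hdrop]
      simp only [h2.1, List.append_assoc,
        List.append_cancel_left_eq]
      rw [hdrop2]
      rfl
    · rw [dif_neg h2, pvALoop_eq_sub inner (i + 1), hdrop]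
      rcases Classical.em (inner[i] = '\\') with hb | hb
      · -- lone trailing backslash: i + 1 = inner.length, drop (i+1) = []
        have hnil : inner.drop (i + 1) = [] :=
          List.drop_eq_nil_of_le (by by_contra hc; exact h2 ⟨hb, by omega⟩)
        rw [hnil, hb]
        simp [pvSub]
      · rw [pvSub_cons_ne _ _ hb]
        simp
  · rw [pvALoop, dif_neg h]
    simp [List.drop_eq_nil_of_le (by omega : inner.length ≤ i), pvSub]
termination_by inner.length - i

-- ===== VERDICT (by name: the statement is the Claim_ definition above) =====
theorem eval_string_py_spec : Claim_equal_eval_string_py := by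
  intro raw _
  show eval_string_py raw = eval_string_py_alt raw
  unfold eval_string_py eval_string_py_alt pvInnerA
  rw [pvALoop_eq_sub]
  simp
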